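-- pv_equiv track=rewrite | github.com/tamle29092004/CauTrucDuLieu | Session_4/Chương 5/Bai_5_7.py | prefix_to_infix
-- ===== SOURCE A (Python) =====
-- class Stack:
--     def __init__(self):
--         self.items = []  # Danh sách để lưu các phần tử trong stack
--
--     def push(self, item):
--         """Thêm một phần tử vào đỉnh stack."""
--         self.items.append(item)
--
--     def pop(self):
--         """Lấy và loại bỏ phần tử trên cùng của stack."""
--         if not self.is_empty():
--             return self.items.pop()
--         return None
--
--     def top(self):
--         """Trả về phần tử trên cùng của stack mà không loại bỏ nó."""
--         return self.items[-1] if not self.is_empty() else None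
--
--     def is_empty(self):
--         """Kiểm tra xem stack có rỗng không."""
--         return len(self.items) == 0
--
-- def prefix_to_infix(expression):
--     """Chuyển đổi biểu thức tiền tố thành trung tố bằng cách sử dụng stack."""
--     stack = Stack()
--
--     for ch in reversed(expression):  # Duyệt ngược biểu thức
--         if ch.isalnum():  # Nếu là toán hạng, đẩy vào stack
--             stack.push(ch)
--         else:  # Nếu là toán tử
--             op1 = stack.pop()
--             op2 = stack.pop()
--             new_expr = f'({op1}{ch}{op2})'  # Ghép thành biểu thức trung tố
--             stack.push(new_expr)
--
--     return stack.pop()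
-- ===== SOURCE B (Python) =====
-- def prefix_to_infix(expression):
--     """Recursive-descent: read the prefix expression forward through a shared iterator."""
--     it = iter(expression)
--     def parse():
--         ch = next(it, None)
--         if ch is None:
--             return None
--         if ch.isalnum():
--             return ch
--         op1 = parse()
--         op2 = parse()
--         return f'({op1}{ch}{op2})'
--     return parse()
-- ===== Notes on version B (the rewrite author's own statement) =====
-- stated objective: simpler
-- what changed: Replaced the Stack class and the reversed-scan stack loop by a forward recursive-descent parser over a shared iterator (next(it, None)); the parser stops as soon as one complete expression is read, so on inputs with trailing material it touches only a prefix while A always scans the whole string.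
-- outside the precondition, e.g. on prefix_to_infix(''): A returns None, B returns None
import Mathlib
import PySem

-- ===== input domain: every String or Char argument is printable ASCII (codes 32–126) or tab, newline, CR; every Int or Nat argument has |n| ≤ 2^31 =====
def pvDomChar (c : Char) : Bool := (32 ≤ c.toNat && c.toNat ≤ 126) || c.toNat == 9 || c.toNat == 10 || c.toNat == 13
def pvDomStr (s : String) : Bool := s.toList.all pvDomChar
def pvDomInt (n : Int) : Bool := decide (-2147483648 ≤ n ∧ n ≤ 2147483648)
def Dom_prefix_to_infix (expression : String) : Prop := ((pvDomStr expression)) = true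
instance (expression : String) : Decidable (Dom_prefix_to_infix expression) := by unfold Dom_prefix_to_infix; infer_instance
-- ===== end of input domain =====

-- B replaces A's explicit stack over the reversed string by a forward recursive-descent
-- parser (simpler decomposition); equivalence proved on all nonempty strings.


-- ===== PORT A =====
-- Python's f'{x}' prints None as "None"
def pvFmt (o : Option String) : String := o.getD "None"

-- one iteration of A's loop: stack top is the list head; pop on empty yields none
def pvStepA (st : List String) (ch : Char) : List String :=
  if PySem.Chars.isalnum ch then String.singleton ch :: st
  else
    let op1 := st.head?
    let st1 := st.tail
    let op2 := st1.head?
    let st2 := st1.tail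
    ("(" ++ pvFmt op1 ++ String.singleton ch ++ pvFmt op2 ++ ")") :: st2

def prefix_to_infix (expression : String) : String :=
  let stack := expression.toList.reverse.foldl pvStepA []
  pvFmt stack.head?   -- final stack.pop(); none (Python None) only outside Pre_

-- ===== PORT B =====
-- parse() from Source B; the list returned with the result is the iterator's remaining
-- characters; `none` = next(it, None) exhausted. The fuel argument (always called with
-- fuel ≥ length, see prefix_to_infix_alt) is only a totality guard — parsing consumes
-- the input, so the fuel-0 branch is never reached on the calls made.
def pvParseB : Nat → List Char → Option String × List Char
  | _, [] => (none, [])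
  | 0, cs => (none, cs)   -- unreachable totality guard
  | fuel + 1, c :: rest =>
    if PySem.Chars.isalnum c then (some (String.singleton c), rest)
    else
      let p1 := pvParseB fuel rest
      let p2 := pvParseB fuel p1.2
      (some ("(" ++ pvFmt p1.1 ++ String.singleton c ++ pvFmt p2.1 ++ ")"), p2.2)

def prefix_to_infix_alt (expression : String) : String :=
  pvFmt (pvParseB expression.toList.length expression.toList).1

-- ===== PRECONDITION & SPEC =====
-- Pre_ excludes only the empty string, on which A (and B) return Python's None, not a str.
def Pre_prefix_to_infix (expression : String) : Prop := expression ≠ ""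
instance (expression : String) : Decidable (Pre_prefix_to_infix expression) := by unfold Pre_prefix_to_infix; infer_instance
def pvWitness_prefix_to_infix : String := "+a*b1"

def Spec_prefix_to_infix (expression : String) (out : String) : Prop := out = prefix_to_infix_alt expression
instance (expression : String) (out : String) : Decidable (Spec_prefix_to_infix expression out) := by unfold Spec_prefix_to_infix; infer_instance

-- ===== CLAIM (what is proved, stated in full; the proofs are below) =====
def Claim_equal_prefix_to_infix : Prop := ∀ (expression : String), Dom_prefix_to_infix expression → Pre_prefix_to_infix expression → Spec_prefix_to_infix expression (prefix_to_infix expression)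

-- ===== LEMMAS AND PROOFS =====

-- A's stack after consuming cs (A scans cs from its right end), starting empty
def pvStackA (cs : List Char) : List String := cs.reverse.foldl pvStepA []

theorem pvStackA_cons (c : Char) (cs : List Char) :
    pvStackA (c :: cs) = pvStepA (pvStackA cs) c := by
  simp [pvStackA, List.foldl_append]

theorem pvParseB_nil (fuel : Nat) : pvParseB fuel [] = (none, []) := by
  cases fuel <;> rfl

theorem pvParseB_none (fuel : Nat) (cs : List Char) (hf : cs.length ≤ fuel)
    (h : (pvParseB fuel cs).1 = none) : cs = [] := by
  cases cs with
  | nil => rfl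
  | cons c rest =>
    cases fuel with
    | zero => simp at hf
    | succ fuel => rw [pvParseB] at h; split at h <;> simp at h

theorem pvParseB_consume : ∀ (fuel : Nat) (cs : List Char),
    (pvParseB fuel cs).2.length ≤ cs.length := by
  intro fuel
  induction fuel with
  | zero => intro cs; cases cs <;> simp [pvParseB]
  | succ fuel ih =>
    intro cs
    cases cs with
    | nil => simp [pvParseB]
    | cons c rest =>
      rw [pvParseB]
      split
      · simp
      · have h1 := ih rest
        have h2 := ih (pvParseB fuel rest).2
        simp only [List.length_cons]
        omega

-- key invariant: A's stack after cs is B's parse of cs consed on A's stack after the rest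
theorem pvKey : ∀ (fuel : Nat) (cs : List Char), cs.length ≤ fuel →
    ∀ (s : String) (r : List Char), pvParseB fuel cs = (some s, r) →
    pvStackA cs = s :: pvStackA r := by
  intro fuel
  induction fuel with
  | zero =>
    intro cs hf s r hp
    interval_cases h : cs.length
    rw [List.length_eq_zero_iff.mp h, pvParseB_nil] at hp
    simp at hp
  | succ fuel ih =>
    intro cs hf s r hp
    cases cs with
    | nil => rw [pvParseB_nil] at hp; simp at hp
    | cons c rest =>
      simp only [List.length_cons, Nat.succ_le_succ_iff] at hf
      rw [pvParseB] at hp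
      rw [pvStackA_cons]
      by_cases hal : PySem.Chars.isalnum c = true
      · rw [if_pos hal] at hp
        injection hp with hs hr
        injection hs with hs
        subst hr; subst hs
        simp [pvStepA, hal]
      · rw [if_neg hal] at hp
        rcases h1 : pvParseB fuel rest with ⟨a, r1⟩
        rcases h2 : pvParseB fuel r1 with ⟨b, r2⟩
        simp only [h1, h2] at hp
        injection hp with hs hr
        injection hs with hs
        subst hr; subst hs
        have hr1len : r1.length ≤ fuel := by
          have h := pvParseB_consume fuel rest
          rw [h1] at h
          simp at h
          omega
        rcases a with _ | s1
        · -- first operand missing: rest was empty, so was everything after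
          have hre : rest = [] := pvParseB_none fuel rest hf (by rw [h1])
          subst hre
          rw [pvParseB_nil] at h1
          injection h1 with hf1 hr1
          subst hr1
          rw [pvParseB_nil] at h2
          injection h2 with hf2 hr2
          subst hr2
          subst hf2
          simp [pvStackA, pvStepA, hal, pvFmt]
        · have hrest := ih rest hf s1 r1 h1
          rcases b with _ | s2
          · -- second operand missing: r1 (hence the leftover) empty
            have hr1e : r1 = [] := pvParseB_none fuel r1 hr1len (by rw [h2])
            subst hr1e
            rw [pvParseB_nil] at h2
            injection h2 with hf2 hr2
            subst hr2
            rw [hrest]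
            simp [pvStackA, pvStepA, hal, pvFmt]
          · have hrest1 := ih r1 hr1len s2 r2 h2
            rw [hrest, hrest1]
            simp [pvStepA, hal, pvFmt]

-- ===== VERDICT (by name: the statement is the Claim_ definition above) =====
theorem prefix_to_infix_spec : Claim_equal_prefix_to_infix := by
  intro expression _ hpre
  unfold Spec_prefix_to_infix prefix_to_infix prefix_to_infix_alt
  have hne : expression.toList ≠ [] := by
    intro h
    exact hpre (by simpa using h)
  rcases hp : pvParseB expression.toList.length expression.toList with ⟨a, r⟩
  rcases a with _ | s
  · exact absurd (pvParseB_none _ _ (le_refl _) (by rw [hp])) hne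
  · have hk := pvKey expression.toList.length expression.toList (le_refl _) s r hp
    show pvFmt (pvStackA expression.toList).head? = _
    rw [hk]
    simp [pvFmt]
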